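-- pv_equiv track=rewrite | github.com/pawel002/29.11.2021 | 05.py | primeSlices
-- ===== SOURCE A (Python) =====
-- from math import sqrt
--
-- def is_prime(n):
--     if 2 <= n <= 3:
--         return True
--     if n % 2 == 0 or n % 3 == 0 or n <= 1:
--         return False
--     for i in range(6, int(sqrt(n) + 1), 6):
--         if n % (i - 1) == 0 or n % (i + 1) == 0:
--             return False
--     return True
--
-- def primeSlices(T, pos):
--     if pos == len(T):
--         return True
--     for i in range(30):
--         if pos + i < len(T):
--             number = 0
--             for j in range(i+1):
--                 if pos + j < len(T):
--                     number += 2 ** (i-j) * T[pos + j]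
--             if is_prime(number):
--                 if primeSlices(T, pos + i + 1):
--                     return True
--     return False
-- ===== SOURCE B (Python) =====
-- # B: top-down recursion memoized per position (each position solved at most once) instead of
-- # A's plain recursion; slice values built incrementally by Horner's rule.
-- from math import sqrt
--
-- def is_prime(n):
--     if n < 2:
--         return False
--     if n < 4:
--         return True
--     if n % 2 == 0 or n % 3 == 0:
--         return False
--     for k in range(6, int(sqrt(n) + 1), 6):
--         if n % (k - 1) == 0:
--             return False
--         if n % (k + 1) == 0:
--             return False
--     return True
--
-- def primeSlices(T, pos):
--     n = len(T)
--     memo = {}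
--
--     def solve(p):
--         if p >= n:
--             return p == n
--         if p in memo:
--             return memo[p]
--         res = False
--         number = 0
--         for i in range(p, min(p + 30, n)):
--             number = 2 * number + T[i]
--             if is_prime(number) and solve(i + 1):
--                 res = True
--                 break
--         memo[p] = res
--         return res
--
--     return solve(pos)
-- ===== Notes on version B (the rewrite author's own statement) =====
-- stated objective: alternative
-- what changed: Replaces A's plain top-down recursion (which recomputes the same suffixes many times) by recursion memoized in a dict keyed by position, with each slice value built incrementally by Horner's rule instead of a nested power sum.
-- outside the precondition, e.g. on primeSlices([1, 1], -2): A returns True, B returns True; on primeSlices([1], -5): A raises IndexError, B raises IndexError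
import Mathlib
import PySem

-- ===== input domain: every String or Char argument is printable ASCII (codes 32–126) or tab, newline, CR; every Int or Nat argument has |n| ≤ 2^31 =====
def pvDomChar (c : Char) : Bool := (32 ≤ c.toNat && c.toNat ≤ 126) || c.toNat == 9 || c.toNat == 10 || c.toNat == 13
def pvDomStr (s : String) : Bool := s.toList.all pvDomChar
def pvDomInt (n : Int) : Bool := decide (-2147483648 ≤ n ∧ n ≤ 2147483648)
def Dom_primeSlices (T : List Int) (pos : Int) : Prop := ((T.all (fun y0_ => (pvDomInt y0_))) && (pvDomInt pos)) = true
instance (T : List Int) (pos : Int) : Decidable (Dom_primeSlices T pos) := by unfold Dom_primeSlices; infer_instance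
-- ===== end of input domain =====

-- B replaces A's plain recursion by position-memoized recursion (a dict keyed by position,
-- slice values built by Horner's rule); equivalence of the return values is proved for pos ≥ 0.


-- ===== PORT A =====

-- Exact integer model of Python's float expression `int(sqrt(n) + 1)` for n ≥ 1 (both Pythons use
-- it verbatim): round n to the nearest IEEE double (53-bit significand, half-even), take the
-- correctly rounded square root, floor, add 1.  Exact for n < 2^63 (our numbers are < 2^62).
def pyFlRound (n : Nat) : Nat :=
  if n < 2 ^ 53 then n
  else
    let b := Nat.log2 n
    let sh := b - 52
    let q := n >>> sh
    let r := n - (q <<< sh)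
    let h := 1 <<< (sh - 1)
    let q' := if r > h ∨ (r = h ∧ q % 2 = 1) then q + 1 else q
    q' <<< sh

def pySqrtBound (n : Int) : Int :=
  let f := pyFlRound n.toNat
  let e := Nat.log2 f / 2
  let t := 52 - e
  let M := f * 4 ^ t
  let s := Nat.sqrt M
  let k := if M ≥ s * s + s + 1 then s + 1 else s
  ((k / 2 ^ t : Nat) : Int) + 1

def isPrimeA (n : Int) : Bool :=
  if 2 ≤ n ∧ n ≤ 3 then true
  else if PySem.Int.mod n 2 = 0 ∨ PySem.Int.mod n 3 = 0 ∨ n ≤ 1 then false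
  else (PySem.List.pyRange 6 (pySqrtBound n) 6).all
    (fun i => !(PySem.Int.mod n (i - 1) == 0 || PySem.Int.mod n (i + 1) == 0))

def primeSlices (T : List Int) (pos : Int) : Bool :=
  if pos = (T.length : Int) then true
  else
    (PySem.List.pyRange 0 30 1).attach.any (fun ⟨i, hmem⟩ =>
      if h : pos + i < (T.length : Int) then
        let number := (PySem.List.pyRange 0 (i + 1) 1).foldl
          (fun num j =>
            if pos + j < (T.length : Int) then
              num + 2 ^ (i - j).toNat * PySem.List.pyGetD T (pos + j) 0
            else num) 0
        isPrimeA number && primeSlices T (pos + i + 1)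
      else false)
termination_by (T.length - pos).toNat
decreasing_by
  have h30 := (PySem.List.mem_pyRange_one.mp hmem).1
  omega

-- ===== PORT B =====

def isPrimeB (n : Int) : Bool :=
  if n < 2 then false
  else if n < 4 then true
  else if PySem.Int.mod n 2 = 0 ∨ PySem.Int.mod n 3 = 0 then false
  else (PySem.List.pyRange 6 (pySqrtBound n) 6).all
    (fun k =>
      if PySem.Int.mod n (k - 1) == 0 then false
      else if PySem.Int.mod n (k + 1) == 0 then false
      else true)

def solveB (T : List Int) (pos : Int) (memo : PySem.Dict Int Bool) :
    Bool × PySem.Dict Int Bool :=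
  if pos ≥ (T.length : Int) then (pos == (T.length : Int), memo)
  else
    match PySem.Dict.get? memo pos with
    | some b => (b, memo)
    | none =>
      let st := (PySem.List.pyRange pos (min (pos + 30) (T.length : Int)) 1).attach.foldl
        (fun (st : Int × Bool × PySem.Dict Int Bool) (i : {x // x ∈ PySem.List.pyRange pos (min (pos + 30) (T.length : Int)) 1}) =>
          if st.2.1 then st
          else
            let number := 2 * st.1 + PySem.List.pyGetD T i.1 0
            if isPrimeB number then
              let r := solveB T (i.1 + 1) st.2.2
              if r.1 then (number, true, r.2) else (number, false, r.2)
            else (number, false, st.2.2))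
        (0, false, memo)
      (st.2.1, PySem.Dict.insert st.2.2 pos st.2.1)
termination_by ((T.length : Int) - pos).toNat
decreasing_by
  obtain ⟨h1, h2⟩ := PySem.List.mem_pyRange_one.mp i.2
  omega

def primeSlices_alt (T : List Int) (pos : Int) : Bool :=
  (solveB T pos PySem.Dict.empty).1

-- ===== PRECONDITION & SPEC =====
-- Pre_ excludes negative pos: there the behaviour rests on Python negative-index wraparound
-- (A raises IndexError for pos < -len(T), otherwise reads wrapped elements) — an accident of
-- indexing a position argument; B happens to behave the same there, but the claim is restricted
-- to the natural domain pos ≥ 0.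
def Pre_primeSlices (T : List Int) (pos : Int) : Prop := 0 ≤ pos
instance (T : List Int) (pos : Int) : Decidable (Pre_primeSlices T pos) := by
  unfold Pre_primeSlices; infer_instance

def pvWitness_primeSlices : List Int × Int := ([1, 0], 0)

def Spec_primeSlices (T : List Int) (pos : Int) (out : Bool) : Prop := out = primeSlices_alt T pos
instance (T : List Int) (pos : Int) (out : Bool) : Decidable (Spec_primeSlices T pos out) := by
  unfold Spec_primeSlices; infer_instance

-- ===== CLAIM (what is proved, stated in full; the proofs are below) =====
def Claim_equal_primeSlices : Prop := ∀ (T : List Int) (pos : Int), Dom_primeSlices T pos → Pre_primeSlices T pos → Spec_primeSlices T pos (primeSlices T pos)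

-- ===== LEMMAS AND PROOFS =====

-- Horner evaluation of a digit list with initial accumulator
def hornerExt (num : Int) (xs : List Int) : Int := xs.foldl (fun a x => 2 * a + x) num

-- value of the slice T[p .. p+d] read as binary digits
def segVal (T : List Int) (p d : Nat) : Int := hornerExt 0 ((T.drop p).take (d + 1))

-- reference function: can the suffix starting at p be split into prime slices of length ≤ 30
def good (T : List Int) (p : Nat) : Bool :=
  if h : p < T.length then
    (List.range (min 30 (T.length - p))).any
      (fun d => isPrimeB (segVal T p d) && good T (p + d + 1))
  else decide (p = T.length)
termination_by T.length - p
decreasing_by omega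

lemma ipAB (n : Int) : isPrimeA n = isPrimeB n := by
  unfold isPrimeA isPrimeB
  by_cases h1 : n < 2
  · rw [if_neg (by omega : ¬ (2 ≤ n ∧ n ≤ 3)), if_pos h1,
      if_pos (Or.inr (Or.inr (by omega : n ≤ 1)))]
  · by_cases h2 : n < 4
    · rw [if_pos (by omega : 2 ≤ n ∧ n ≤ 3), if_neg h1, if_pos h2]
    · rw [if_neg (by omega : ¬ (2 ≤ n ∧ n ≤ 3)), if_neg h1, if_neg h2]
      by_cases hm : PySem.Int.mod n 2 = 0 ∨ PySem.Int.mod n 3 = 0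
      · rw [if_pos (by tauto : PySem.Int.mod n 2 = 0 ∨ PySem.Int.mod n 3 = 0 ∨ n ≤ 1), if_pos hm]
      · rw [if_neg (by rintro (h | h | h); exacts [hm (Or.inl h), hm (Or.inr h), by omega]),
          if_neg hm]
        have hf : (fun (i : Int) =>
            !(PySem.Int.mod n (i - 1) == 0 || PySem.Int.mod n (i + 1) == 0)) =
            (fun k =>
              if PySem.Int.mod n (k - 1) == 0 then false
              else if PySem.Int.mod n (k + 1) == 0 then false
              else true) := by
          funext k
          cases hc1 : (PySem.Int.mod n (k - 1) == 0) <;>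
            cases hc2 : (PySem.Int.mod n (k + 1) == 0) <;> simp_all
        rw [hf]

lemma hornerExt_append (num : Int) (xs : List Int) (x : Int) :
    hornerExt num (xs ++ [x]) = 2 * hornerExt num xs + x := by
  simp [hornerExt, List.foldl_append]

lemma segVal_succ (T : List Int) (p d : Nat) (h : p + (d + 1) < T.length) :
    segVal T p (d + 1) = 2 * segVal T p d + T.getD (p + (d + 1)) 0 := by
  rw [segVal, List.take_add_one, List.getElem?_drop, List.getElem?_eq_getElem h]
  rw [show ((some (T[p + (d+1)]'h)).toList) = [T[p + (d+1)]'h] from rfl, hornerExt_append]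
  rw [List.getD_eq_getElem?_getD, List.getElem?_eq_getElem h]
  simp [segVal]

lemma segVal_zero (T : List Int) (p : Nat) (h : p < T.length) :
    segVal T p 0 = T.getD p 0 := by
  have h0 : p + 0 < T.length := by omega
  rw [segVal, show (0+1:Nat) = 0 + 1 from rfl, List.take_add_one, List.getElem?_drop,
    List.getElem?_eq_getElem h0]
  rw [List.getD_eq_getElem?_getD, List.getElem?_eq_getElem (show p < T.length from h)]
  simp [hornerExt]

lemma sum_pow_seg (T : List Int) (p : Nat) : ∀ d, p + d < T.length →
    ((List.range (d + 1)).map (fun k => 2 ^ (d - k) * T.getD (p + k) 0)).sum = segVal T p d := by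
  intro d
  induction d with
  | zero => intro h; simp [segVal_zero T p (by omega)]
  | succ d ih =>
    intro h
    rw [List.range_succ, List.map_append, List.sum_append]
    have hstep : ((List.range (d + 1)).map (fun k => 2 ^ (d + 1 - k) * T.getD (p + k) 0)).sum
        = 2 * ((List.range (d + 1)).map (fun k => 2 ^ (d - k) * T.getD (p + k) 0)).sum := by
      rw [← List.sum_map_mul_left]
      apply congrArg
      apply List.map_congr_left
      intro k hk
      rw [List.mem_range] at hk
      rw [show d + 1 - k = (d - k) + 1 by omega, pow_succ]
      ring
    rw [hstep, ih (by omega)]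
    simp only [List.map_cons, List.map_nil, List.sum_cons, List.sum_nil]
    rw [segVal_succ T p d (by omega)]
    simp

lemma aNum_eq (T : List Int) (p d : Nat) (h : p + d < T.length) :
    (PySem.List.pyRange 0 ((d : Int) + 1) 1).foldl
      (fun num j =>
        if (p : Int) + j < (T.length : Int) then
          num + 2 ^ (((d : Int)) - j).toNat * PySem.List.pyGetD T ((p : Int) + j) 0
        else num) 0 = segVal T p d := by
  have hbody : (fun (num j : Int) =>
      if (p : Int) + j < (T.length : Int) then
        num + 2 ^ (((d : Int)) - j).toNat * PySem.List.pyGetD T ((p : Int) + j) 0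
      else num) = (fun num j => num +
        (if (p : Int) + j < (T.length : Int) then
          2 ^ (((d : Int)) - j).toNat * PySem.List.pyGetD T ((p : Int) + j) 0 else 0)) := by
    funext num j
    split <;> simp
  rw [hbody, PySem.List.foldl_add, PySem.List.pyRange_one]
  rw [List.map_map]
  rw [show ((d : Int) + 1 - 0).toNat = d + 1 by omega]
  have hmap : (List.range (d + 1)).map
      ((fun j => if (p : Int) + j < (T.length : Int) then
          2 ^ (((d : Int)) - j).toNat * PySem.List.pyGetD T ((p : Int) + j) 0 else 0) ∘
        (fun k : Nat => (0 : Int) + k)) =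
      (List.range (d + 1)).map (fun k => 2 ^ (d - k) * T.getD (p + k) 0) := by
    apply List.map_congr_left
    intro k hk
    rw [List.mem_range] at hk
    simp only [Function.comp_apply, zero_add]
    rw [if_pos (by omega)]
    rw [show ((p : Int) + (k : Int)) = ((p + k : Nat) : Int) by push_cast; ring,
      PySem.List.pyGetD_natCast]
    congr 1
    congr 1
    omega
  rw [hmap, zero_add, sum_pow_seg T p d h]

lemma A_base (T : List Int) (p : Nat) (hp : T.length < p) :
    primeSlices T (p : Int) = good T p := by
  rw [primeSlices, good]
  rw [if_neg (by exact_mod_cast by omega : ¬ ((p : Int) = (T.length : Int))), dif_neg (by omega)]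
  rw [List.any_eq_false.mpr ?_, eq_comm, decide_eq_false (by omega)]
  rintro ⟨i, hm⟩ _
  have h0 := (PySem.List.mem_pyRange_one.mp hm).1
  simp only
  rw [dif_neg (by omega)]
  simp

lemma A_eq_good (T : List Int) : ∀ (k p : Nat), T.length - p ≤ k →
    primeSlices T (p : Int) = good T p := by
  intro k
  induction k with
  | zero =>
    intro p hk
    rcases (by omega : p = T.length ∨ T.length < p) with hp | hp
    · subst hp
      rw [primeSlices, good, if_pos rfl, dif_neg (by omega)]
      simp
    · exact A_base T p hp
  | succ k ih =>
    intro p hk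
    rcases (by omega : T.length ≤ p ∨ p < T.length) with hp | hp
    · rcases (by omega : p = T.length ∨ T.length < p) with hp' | hp'
      · subst hp'
        rw [primeSlices, good, if_pos rfl, dif_neg (by omega)]
        simp
      · exact A_base T p hp'
    · rw [primeSlices, good]
      rw [if_neg (by exact_mod_cast by omega : ¬ ((p : Int) = (T.length : Int))), dif_pos hp]
      rw [Bool.eq_iff_iff, List.any_eq_true, List.any_eq_true]
      constructor
      · rintro ⟨⟨i, hm⟩, -, hx⟩
        obtain ⟨h0, h30⟩ := PySem.List.mem_pyRange_one.mp hm
        simp only at hx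
        by_cases h2 : (p : Int) + i < (T.length : Int)
        · rw [dif_pos h2] at hx
          set d := i.toNat with hd
          have hid : i = (d : Int) := by omega
          refine ⟨d, List.mem_range.mpr (by omega), ?_⟩
          rw [hid] at hx
          rw [aNum_eq T p d (by omega)] at hx
          rw [ipAB] at hx
          rw [show (p : Int) + (d : Int) + 1 = ((p + d + 1 : Nat) : Int) by push_cast; ring] at hx
          rw [ih (p + d + 1) (by omega)] at hx
          exact hx
        · rw [dif_neg h2] at hx
          exact absurd hx (by simp)
      · rintro ⟨d, hd, hx⟩
        rw [List.mem_range] at hd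
        refine ⟨⟨(d : Int), PySem.List.mem_pyRange_one.mpr (by omega)⟩, List.mem_attach _ _, ?_⟩
        simp only
        rw [dif_pos (by omega)]
        rw [aNum_eq T p d (by omega)]
        rw [ipAB]
        rw [show (p : Int) + (d : Int) + 1 = ((p + d + 1 : Nat) : Int) by push_cast; ring]
        rw [ih (p + d + 1) (by omega)]
        exact hx

def stepB (T : List Int) (st : Int × Bool × PySem.Dict Int Bool) (i : Int) :
    Int × Bool × PySem.Dict Int Bool :=
  if st.2.1 then st
  else
    let number := 2 * st.1 + PySem.List.pyGetD T i 0
    if isPrimeB number then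
      let r := solveB T (i + 1) st.2.2
      if r.1 then (number, true, r.2) else (number, false, r.2)
    else (number, false, st.2.2)

def Minv (T : List Int) (memo : PySem.Dict Int Bool) : Prop :=
  ∀ q b, PySem.Dict.get? memo q = some b → 0 ≤ q ∧ b = good T q.toNat

lemma stepB_frozen (T : List Int) :
    ∀ (l : List Int) (st : Int × Bool × PySem.Dict Int Bool), st.2.1 = true →
      l.foldl (stepB T) st = st := by
  intro l
  induction l with
  | nil => intro st h; rfl
  | cons x xs ih =>
    intro st h
    rw [List.foldl_cons, stepB, if_pos h, ih st h]

lemma good_gt (T : List Int) (q : Nat) (hq : T.length < q) : good T q = false := by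
  rw [good, dif_neg (by omega)]
  simp
  omega

lemma innerB (T : List Int) (k : Nat)
    (IH : ∀ (p' : Nat) (memo' : PySem.Dict Int Bool),
      ((T.length : Int) - (p' : Int)).toNat ≤ k → Minv T memo' →
      (solveB T (p' : Int) memo').1 = good T p' ∧ Minv T (solveB T (p' : Int) memo').2) :
    ∀ (c m : Nat) (num : Int) (memo : PySem.Dict Int Bool),
      m + c ≤ T.length → T.length ≤ k + m + 1 → Minv T memo →
      (((PySem.List.pyRange (m : Int) ((m : Int) + (c : Int)) 1).foldl (stepB T)
          (num, false, memo)).2.1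
        = (List.range c).any (fun d =>
            isPrimeB (hornerExt num ((T.drop m).take (d + 1))) && good T (m + d + 1)))
      ∧ Minv T (((PySem.List.pyRange (m : Int) ((m : Int) + (c : Int)) 1).foldl (stepB T)
          (num, false, memo)).2.2) := by
  intro c
  induction c with
  | zero =>
    intro m num memo hmc hk hmemo
    rw [show ((m : Int) + ((0:Nat) : Int)) = (m : Int) by push_cast; ring]
    rw [PySem.List.pyRange_one_eq_nil le_rfl]
    exact ⟨rfl, hmemo⟩
  | succ c ih =>
    intro m num memo hmc hk hmemo
    rw [PySem.List.pyRange_one_cons (by push_cast; omega)]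
    rw [List.foldl_cons]
    have hm : m < T.length := by omega
    have hx : PySem.List.pyGetD T (m : Int) 0 = T.getD m 0 := PySem.List.pyGetD_natCast T m 0
    have hdrop : T.drop m = T[m] :: T.drop (m + 1) := List.drop_eq_getElem_cons hm
    have hTm : T.getD m 0 = T[m] := by
      rw [List.getD_eq_getElem?_getD, List.getElem?_eq_getElem hm]; rfl
    have htake1 : (T.drop m).take 1 = [T[m]] := by rw [hdrop]; rfl
    have hh1 : hornerExt num [T[m]] = 2 * num + T[m] := by simp [hornerExt]
    have hcast : ((m : Int) + 1) = ((m + 1 : Nat) : Int) := by push_cast; ring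
    rw [stepB]
    simp only [if_neg Bool.false_ne_true, hx]
    -- the d = 0 entry of the RHS `any`
    have hterm0 : (isPrimeB (hornerExt num ((T.drop m).take (0 + 1))) && good T (m + 0 + 1))
        = (isPrimeB (2 * num + T.getD m 0) && good T (m + 1)) := by
      rw [show (0+1:Nat) = 1 from rfl, htake1, hh1, ← hTm]
    -- the tail entries of the RHS `any` match the fold from m+1
    have hshift : ((List.range c).any (fun d =>
          isPrimeB (hornerExt (2 * num + T.getD m 0) ((T.drop (m + 1)).take (d + 1))) &&
            good T (m + 1 + d + 1)))
        = ((List.map Nat.succ (List.range c)).any (fun d =>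
            isPrimeB (hornerExt num ((T.drop m).take (d + 1))) && good T (m + d + 1))) := by
      rw [List.any_map]
      symm
      refine List.any_congr rfl ?_
      intro d
      simp only [Function.comp_apply, Nat.succ_eq_add_one]
      have hseg : (T.drop m).take (d + 1 + 1) = T[m] :: ((T.drop (m + 1)).take (d + 1)) := by
        rw [hdrop]; rfl
      have hh : hornerExt num ((T.drop m).take (d + 1 + 1))
          = hornerExt (2 * num + T.getD m 0) ((T.drop (m + 1)).take (d + 1)) := by
        rw [hseg, hTm]; rfl
      rw [hh]
      congr 2
      omega
    by_cases hp : isPrimeB (2 * num + T.getD m 0) = true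
    · rw [if_pos hp]
      have hr := IH (m + 1) memo (by omega) hmemo
      rw [← hcast] at hr
      by_cases hr1 : (solveB T ((m : Int) + 1) memo).1 = true
      · rw [if_pos hr1]
        rw [stepB_frozen T _ _ rfl]
        constructor
        · symm
          rw [List.any_eq_true]
          refine ⟨0, List.mem_range.mpr (by omega), ?_⟩
          rw [hterm0]
          rw [hp, ← hr.1, hr1]
          rfl
        · exact hr.2
      · rw [if_neg hr1]
        have hihs := ih (m + 1) (2 * num + T.getD m 0) (solveB T ((m : Int) + 1) memo).2
          (by omega) (by omega) hr.2
        rw [show ((m + 1 : Nat) : Int) + (c : Int) = (m : Int) + ((c + 1 : Nat) : Int) by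
          push_cast; ring] at hihs
        rw [show ((m + 1 : Nat) : Int) = (m : Int) + 1 by push_cast; ring] at hihs
        constructor
        · rw [hihs.1]
          rw [List.range_succ_eq_map, List.any_cons]
          rw [hterm0, hp, Bool.true_and,
            (by rw [← hr.1]; exact (Bool.not_eq_true _).mp hr1 : good T (m + 1) = false),
            Bool.false_or]
          exact hshift
        · exact hihs.2
    · rw [if_neg hp]
      have hihs := ih (m + 1) (2 * num + T.getD m 0) memo (by omega) (by omega) hmemo
      rw [show ((m + 1 : Nat) : Int) + (c : Int) = (m : Int) + ((c + 1 : Nat) : Int) by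
        push_cast; ring] at hihs
      rw [show ((m + 1 : Nat) : Int) = (m : Int) + 1 by push_cast; ring] at hihs
      constructor
      · rw [hihs.1]
        rw [List.range_succ_eq_map, List.any_cons]
        rw [hterm0, (Bool.not_eq_true _).mp hp, Bool.false_and, Bool.false_or]
        exact hshift
      · exact hihs.2

lemma solveB_ge (T : List Int) (p : Nat) (memo : PySem.Dict Int Bool) (hp : T.length ≤ p)
    (hmemo : Minv T memo) :
    (solveB T (p : Int) memo).1 = good T p ∧ Minv T (solveB T (p : Int) memo).2 := by
  rw [solveB, if_pos (by omega : (p : Int) ≥ (T.length : Int))]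
  refine ⟨?_, hmemo⟩
  by_cases h : p = T.length
  · subst h
    rw [good, dif_neg (by omega)]
    simp
  · rw [good_gt T p (by omega)]
    simp only [beq_eq_false_iff_ne, ne_eq]
    omega

lemma solveB_correct (T : List Int) : ∀ (k : Nat) (p : Nat) (memo : PySem.Dict Int Bool),
    ((T.length : Int) - (p : Int)).toNat ≤ k → Minv T memo →
    (solveB T (p : Int) memo).1 = good T p ∧ Minv T (solveB T (p : Int) memo).2 := by
  intro k
  induction k with
  | zero =>
    intro p memo hk hmemo
    exact solveB_ge T p memo (by omega) hmemo
  | succ k ih =>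
    intro p memo hk hmemo
    rcases (by omega : T.length ≤ p ∨ p < T.length) with hp | hp
    · exact solveB_ge T p memo hp hmemo
    · rw [solveB, if_neg (by omega : ¬ ((p : Int) ≥ (T.length : Int)))]
      cases hq : PySem.Dict.get? memo (p : Int) with
      | some b =>
        obtain ⟨-, hb⟩ := hmemo _ _ hq
        refine ⟨?_, hmemo⟩
        rw [hb, Int.toNat_natCast]
      | none =>
        have hfold : (fun (st : Int × Bool × PySem.Dict Int Bool)
            (i : {x // x ∈ PySem.List.pyRange (p : Int) (min ((p : Int) + 30) (T.length : Int)) 1}) =>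
            if st.2.1 then st
            else
              let number := 2 * st.1 + PySem.List.pyGetD T i.1 0
              if isPrimeB number then
                let r := solveB T (i.1 + 1) st.2.2
                if r.1 then (number, true, r.2) else (number, false, r.2)
              else (number, false, st.2.2))
            = (fun st i => stepB T st i.1) := rfl
        rw [hfold, List.foldl_attach]
        set c := min 30 (T.length - p) with hc
        have hbound : min ((p : Int) + 30) (T.length : Int) = (p : Int) + (c : Int) := by omega
        rw [hbound]
        have hinner := innerB T k (fun p' memo' hk' hm' => ih p' memo' hk' hm')
          c p 0 memo (by omega) (by omega) hmemo
        have hgood : ((List.range c).any (fun d =>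
            isPrimeB (hornerExt 0 ((T.drop p).take (d + 1))) && good T (p + d + 1)))
            = good T p := by
          rw [good, dif_pos hp, ← hc]
          rfl
        refine ⟨?_, ?_⟩
        · rw [hinner.1, hgood]
        · intro q b hqb
          rw [PySem.Dict.get?_insert] at hqb
          by_cases hqp : q = (p : Int)
          · rw [if_pos hqp] at hqb
            have hb : b = _ := (Option.some.inj hqb).symm
            subst hqp
            refine ⟨by omega, ?_⟩
            rw [hb, hinner.1, hgood, Int.toNat_natCast]
          · rw [if_neg hqp] at hqb
            exact hinner.2 _ _ hqb

lemma B_eq (T : List Int) (p : Nat) : primeSlices_alt T (p : Int) = good T p := by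
  have hempty : Minv T PySem.Dict.empty := by
    intro q b h
    rw [PySem.Dict.get?_empty] at h
    cases h
  exact (solveB_correct T (((T.length : Int) - (p : Int)).toNat) p PySem.Dict.empty
    le_rfl hempty).1

-- ===== VERDICT (by name: the statement is the Claim_ definition above) =====
theorem primeSlices_spec : Claim_equal_primeSlices := by
  intro T pos hdom hpre
  unfold Spec_primeSlices
  obtain ⟨p, rfl⟩ : ∃ p : Nat, pos = (p : Int) := ⟨pos.toNat, by
    have : (0 : Int) ≤ pos := hpre
    omega⟩
  rw [A_eq_good T T.length p (by omega), B_eq T p]
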